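-- pv_equiv track=rewrite | github.com/ysenoh/programing | atcoder/codefest2017C/d.py | f
-- ===== SOURCE A (Python) =====
-- def f(str):
--     s = {}
--     s[0] = 0
--     pat = 0
--
--     bits = [2**i for i in range(26)]
--     lenOfStr = len(str)
--
--     for c in str:
--         pat ^= bits[ord(c)-97]
--         s[pat] = min(
--             min(s.get(pat^bit, lenOfStr) + 1 for bit in bits),
--             s.get(pat, lenOfStr))
--
--     if pat == 0:
--         return 1
--
--     return s[pat]
-- ===== SOURCE B (Python) =====
-- def f(str):
--     bits = [2 ** i for i in range(26)]
--     n = len(str)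
--     if n == 0:
--         return 1
--     P = [0]
--     for c in str:
--         P.append(P[-1] ^ bits[ord(c) - 97])
--     dp = [0]
--     for i in range(1, n + 1):
--         dp.append(min(dp[j] + 1 for j in range(i)
--                       if bin(P[i] ^ P[j]).count('1') <= 1))
--     return dp[n]
-- ===== Notes on version B (the rewrite author's own statement) =====
-- stated objective: alternative
-- what changed: Replaces A's single forward pass that maintains a parity->best dictionary probed at 26 single-bit neighbours by an explicit prefix-parity array followed by the textbook quadratic DP dp[i] = min over j<i with popcount(P[i]^P[j])<=1 of dp[j]+1, returning dp[n] (empty string still gives 1, as in A).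
import Mathlib
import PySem

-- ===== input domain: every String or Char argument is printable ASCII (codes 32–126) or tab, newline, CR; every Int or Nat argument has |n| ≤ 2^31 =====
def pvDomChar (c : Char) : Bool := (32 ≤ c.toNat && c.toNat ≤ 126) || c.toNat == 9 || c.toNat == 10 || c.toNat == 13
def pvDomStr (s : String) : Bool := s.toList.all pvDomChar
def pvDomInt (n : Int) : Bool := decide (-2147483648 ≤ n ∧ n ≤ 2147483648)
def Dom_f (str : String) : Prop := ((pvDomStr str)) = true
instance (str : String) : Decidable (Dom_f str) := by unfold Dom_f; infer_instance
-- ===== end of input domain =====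

-- B replaces A's one-pass parity→best dictionary by a prefix-parity array and the
-- quadratic DP over positions; equal return values on Pre_f (alternative decomposition, not faster).

-- ===== PORT A =====
-- bits = [2**i for i in range(26)]
def pvBits : List Nat := (List.range 26).map (fun i => 2 ^ i)

-- the body of A's for-loop: pat ^= bits[ord(c)-97]; s[pat] = min(min(...), s.get(pat, lenOfStr))
def fStep (lenOfStr : Nat) (st : PySem.Dict Nat Nat × Nat) (b : Nat) :
    PySem.Dict Nat Nat × Nat :=
  let s := st.1
  let pat := st.2 ^^^ b
  let inner := (PySem.List.min? (pvBits.map (fun bit => s.getD (pat ^^^ bit) lenOfStr + 1))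
      (fun x => x)).getD 0   -- bits is nonempty, so Python's min never raises
  let v := min inner (s.getD pat lenOfStr)
  (s.insert pat v, pat)

def f (str : String) : Int :=
  -- bits[ord(c)-97] for each character; `none` = IndexError (excluded by Pre_f)
  match str.toList.mapM (fun c => PySem.List.pyGet? pvBits ((c.toNat : Int) - 97)) with
  | none => 0
  | some bs =>
    let lenOfStr := str.toList.length
    let st := bs.foldl (fStep lenOfStr) ((PySem.Dict.empty : PySem.Dict Nat Nat).insert 0 0, 0)
    if st.2 = 0 then 1 else (((st.1.get? st.2).getD 0 : Nat) : Int)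

-- ===== PORT B =====
-- bin(x).count('1')
def popcount (x : Nat) : Nat :=
  if x = 0 then 0 else x % 2 + popcount (x / 2)
decreasing_by exact Nat.div_lt_self (Nat.pos_of_ne_zero (by assumption)) (by omega)

def f_alt (str : String) : Int :=
  match str.toList.mapM (fun c => PySem.List.pyGet? pvBits ((c.toNat : Int) - 97)) with
  | none => 0
  | some bs =>
    let n := bs.length
    if n = 0 then 1
    else
      -- P.append(P[-1] ^ bits[ord(c)-97])
      let P := bs.foldl (fun acc b => acc ++ [PySem.List.pyGetD acc (-1) 0 ^^^ b]) [0]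
      -- dp.append(min(dp[j]+1 for j in range(i) if bin(P[i]^P[j]).count('1') <= 1))
      let dp := (List.range' 1 n).foldl (fun dp i =>
        dp ++ [(PySem.List.min? ((List.range i).filterMap (fun j =>
            if popcount (P.getD i 0 ^^^ P.getD j 0) ≤ 1 then some (dp.getD j 0 + 1)
            else none)) (fun x => x)).getD 0]) [0]
      ((dp.getD n 0 : Nat) : Int)

-- ===== PRECONDITION & SPEC =====
-- Pre_f excludes exactly the strings containing a character with ord outside [71,122]:
-- on those bits[ord(c)-97] raises IndexError in A (and in B alike).
def Pre_f (str : String) : Prop :=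
  (str.toList.all (fun c => 71 ≤ c.toNat && c.toNat ≤ 122)) = true
instance (str : String) : Decidable (Pre_f str) := by unfold Pre_f; infer_instance
def pvWitness_f : String := "ab"

def Spec_f (str : String) (out : Int) : Prop := out = f_alt str
instance (str : String) (out : Int) : Decidable (Spec_f str out) := by unfold Spec_f; infer_instance

-- ===== CLAIM (what is proved, stated in full; the proofs are below) =====
def Claim_equal_f : Prop := ∀ (str : String), Dom_f str → Pre_f str → Spec_f str (f str)

-- ===== LEMMAS AND PROOFS =====

-- ---- popcount / pvBits ----
theorem pc_zero : popcount 0 = 0 := by simp [popcount]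

theorem pc_eq_zero (x : Nat) : popcount x = 0 ↔ x = 0 := by
  induction x using Nat.strong_induction_on with
  | _ x ih =>
    by_cases hx : x = 0
    · simp [hx, pc_zero]
    · rw [popcount, if_neg hx]
      constructor
      · intro h
        have h2 : popcount (x / 2) = 0 := by omega
        have := (ih (x / 2) (Nat.div_lt_self (Nat.pos_of_ne_zero hx) (by omega))).mp h2
        omega
      · intro h; exact (hx h).elim

theorem pc_two_pow (k : Nat) : popcount (2 ^ k) = 1 := by
  induction k with
  | zero => rw [popcount]; simp [pc_zero]
  | succ k ih =>
    rw [popcount]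
    have h1 : (2:Nat) ^ (k+1) ≠ 0 := by positivity
    have h2 : (2:Nat) ^ (k+1) % 2 = 0 := by
      simp [Nat.pow_succ, Nat.mul_mod_left]
    have h3 : (2:Nat) ^ (k+1) / 2 = 2 ^ k := by
      rw [Nat.pow_succ]; exact Nat.mul_div_cancel _ (by omega)
    simp [h2, h3, ih]

theorem pc_eq_one (x : Nat) (h : popcount x = 1) : ∃ k, x = 2 ^ k := by
  induction x using Nat.strong_induction_on with
  | _ x ih =>
    have hx : x ≠ 0 := by intro h0; rw [h0, pc_zero] at h; omega
    rw [popcount] at h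
    simp only [hx, if_false] at h
    by_cases hp : x % 2 = 1
    · have h2 : popcount (x / 2) = 0 := by omega
      have := (pc_eq_zero (x / 2)).mp h2
      exact ⟨0, by omega⟩
    · have h2 : popcount (x / 2) = 1 := by omega
      obtain ⟨k, hk⟩ := ih (x / 2) (Nat.div_lt_self (Nat.pos_of_ne_zero hx) (by omega)) h2
      exact ⟨k + 1, by rw [Nat.pow_succ]; omega⟩

theorem mem_pvBits (b : Nat) : b ∈ pvBits ↔ ∃ k, k < 26 ∧ b = 2 ^ k := by
  simp [pvBits, List.mem_map, List.mem_range, eq_comm]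

theorem pvBits_pc {b : Nat} (hb : b ∈ pvBits) : popcount b = 1 ∧ b < 2 ^ 26 := by
  obtain ⟨k, hk, rfl⟩ := (mem_pvBits b).mp hb
  exact ⟨pc_two_pow k, Nat.pow_lt_pow_right (by omega) hk⟩

theorem mem_pvBits_of_pc {x : Nat} (hlt : x < 2 ^ 26) (h1 : popcount x = 1) : x ∈ pvBits := by
  obtain ⟨k, rfl⟩ := pc_eq_one x h1
  exact (mem_pvBits _).mpr ⟨k, by
    by_contra hk
    have : (2:Nat) ^ 26 ≤ 2 ^ k := Nat.pow_le_pow_right (by omega) (by omega)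
    omega, rfl⟩

theorem getD_mem' (bs : List Nat) (i : Nat) (h : i < bs.length) : bs.getD i 0 ∈ bs := by
  rw [List.getD_eq_getElem bs 0 h]; exact List.getElem_mem h

theorem xor_aba (a b : Nat) : a ^^^ b ^^^ a = b := by
  rw [Nat.xor_comm a b, Nat.xor_xor_cancel_right]

theorem xor_aab (a b : Nat) : a ^^^ (a ^^^ b) = b := by
  rw [← Nat.xor_assoc]; simp

theorem take_succ_eq (bs : List Nat) (i : Nat) (h : i < bs.length) :
    bs.take (i + 1) = bs.take i ++ [bs.getD i 0] := by
  rw [List.take_add_one, List.getElem?_eq_getElem h, List.getD_eq_getElem bs 0 h]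
  rfl

-- ---- prefix parity ----
def parP (bs : List Nat) (i : Nat) : Nat := (bs.take i).foldl (· ^^^ ·) 0

theorem parP_zero (bs : List Nat) : parP bs 0 = 0 := rfl

theorem parP_succ (bs : List Nat) (i : Nat) (h : i < bs.length) :
    parP bs (i + 1) = parP bs i ^^^ bs.getD i 0 := by
  unfold parP
  rw [take_succ_eq bs i h, List.foldl_append]
  rfl

theorem foldl_xor_lt (l : List Nat) (a : Nat) (ha : a < 2 ^ 26)
    (hl : ∀ b ∈ l, b < 2 ^ 26) : l.foldl (· ^^^ ·) a < 2 ^ 26 := by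
  induction l generalizing a with
  | nil => simpa using ha
  | cons x t ih =>
    simp only [List.foldl_cons]
    exact ih (a ^^^ x) (Nat.xor_lt_two_pow ha (hl x (by simp))) (fun b hb => hl b (by simp [hb]))

theorem parP_lt (bs : List Nat) (Hb : ∀ b ∈ bs, b ∈ pvBits) (i : Nat) :
    parP bs i < 2 ^ 26 := by
  apply foldl_xor_lt _ _ (by norm_num)
  intro b hb
  exact (pvBits_pc (Hb b (List.mem_of_mem_take hb))).2

-- ---- reference DP ----
def dpAux (bs : List Nat) : Nat → List Nat
  | 0 => [0]
  | i + 1 =>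
    dpAux bs i ++ [(PySem.List.min? ((List.range (i + 1)).filterMap (fun j =>
        if popcount (parP bs (i + 1) ^^^ parP bs j) ≤ 1
        then some ((dpAux bs i).getD j 0 + 1)
        else none)) (fun x => x)).getD 0]

def dpRef (bs : List Nat) (i : Nat) : Nat := (dpAux bs i).getLastD 0

def cands (bs : List Nat) (i : Nat) : List Nat :=
  (List.range (i + 1)).filterMap (fun j =>
    if popcount (parP bs (i + 1) ^^^ parP bs j) ≤ 1 then some (dpRef bs j + 1) else none)

theorem dpAux_length (bs : List Nat) (i : Nat) : (dpAux bs i).length = i + 1 := by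
  induction i with
  | zero => rfl
  | succ i ih => simp [dpAux, ih]

theorem dpAux_getD (bs : List Nat) (i j : Nat) (h : j ≤ i) :
    (dpAux bs i).getD j 0 = dpRef bs j := by
  induction i with
  | zero =>
    interval_cases j
    rfl
  | succ i ih =>
    rcases Nat.lt_or_ge j (i + 1) with hj | hj
    · rw [dpAux]
      rw [List.getD_append _ _ _ _ (by rw [dpAux_length]; omega)]
      exact ih (by omega)
    · have hj' : j = i + 1 := by omega
      subst hj'
      rw [dpAux, dpRef, dpAux, List.getLastD_concat,
        List.getD_append_right _ _ _ _ (by rw [dpAux_length])]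
      rw [dpAux_length]
      simp

theorem dpRef_zero (bs : List Nat) : dpRef bs 0 = 0 := rfl

theorem dpRef_succ (bs : List Nat) (i : Nat) :
    dpRef bs (i + 1) = (PySem.List.min? (cands bs i) (fun x => x)).getD 0 := by
  rw [dpRef, dpAux]
  rw [List.getLastD_concat]
  congr 2
  unfold cands
  apply List.filterMap_congr
  intro j hj
  rw [List.mem_range] at hj
  rw [dpAux_getD bs i j (by omega)]

theorem mem_cands (bs : List Nat) (i y : Nat) :
    y ∈ cands bs i ↔ ∃ j, j ≤ i ∧ popcount (parP bs (i + 1) ^^^ parP bs j) ≤ 1 ∧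
      y = dpRef bs j + 1 := by
  unfold cands
  rw [List.mem_filterMap]
  constructor
  · rintro ⟨j, hj, hy⟩
    rw [List.mem_range] at hj
    split at hy
    · exact ⟨j, by omega, by assumption, by injection hy with h; omega⟩
    · exact absurd hy (by simp)
  · rintro ⟨j, hj, hc, rfl⟩
    exact ⟨j, List.mem_range.mpr (by omega), by simp [hc]⟩

theorem pyminD_spec (l : List Nat) (x : Nat) (hx : x ∈ l) :
    (PySem.List.min? l (fun y => y)).getD 0 ∈ l ∧
    ∀ y ∈ l, (PySem.List.min? l (fun y => y)).getD 0 ≤ y := by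
  have hne : l ≠ [] := by rintro rfl; simp at hx
  rcases hm : PySem.List.min? l (fun y => y) with _ | m
  · exact absurd ((PySem.List.min?_eq_none_iff l _).mp hm) hne
  · exact ⟨by simpa using PySem.List.min?_mem hm,
      fun y hy => by simpa using PySem.List.min?_isMin hm y hy⟩

theorem self_mem_cands (bs : List Nat) (Hb : ∀ b ∈ bs, b ∈ pvBits) (i : Nat)
    (h : i < bs.length) : dpRef bs i + 1 ∈ cands bs i := by
  rw [mem_cands]
  refine ⟨i, le_refl _, ?_, rfl⟩
  rw [parP_succ bs i h, xor_aba]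
  have hmem : bs.getD i 0 ∈ bs := getD_mem' bs i h
  rw [(pvBits_pc (Hb _ hmem)).1]

theorem dpRef_succ_le (bs : List Nat) (i j : Nat) (hj : j ≤ i)
    (hc : popcount (parP bs (i + 1) ^^^ parP bs j) ≤ 1) :
    dpRef bs (i + 1) ≤ dpRef bs j + 1 := by
  rw [dpRef_succ]
  have hmem : dpRef bs j + 1 ∈ cands bs i := (mem_cands bs i _).mpr ⟨j, hj, hc, rfl⟩
  exact (pyminD_spec _ _ hmem).2 _ hmem

theorem dpRef_succ_eq (bs : List Nat) (Hb : ∀ b ∈ bs, b ∈ pvBits) (i : Nat)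
    (h : i < bs.length) :
    ∃ j, j ≤ i ∧ popcount (parP bs (i + 1) ^^^ parP bs j) ≤ 1 ∧
      dpRef bs (i + 1) = dpRef bs j + 1 := by
  rw [dpRef_succ]
  have hself := self_mem_cands bs Hb i h
  obtain ⟨j, hj, hc, he⟩ := (mem_cands bs i _).mp (pyminD_spec _ _ hself).1
  exact ⟨j, hj, hc, he⟩

theorem dpRef_le (bs : List Nat) (Hb : ∀ b ∈ bs, b ∈ pvBits) (i : Nat)
    (h : i ≤ bs.length) : dpRef bs i ≤ i := by
  induction i with
  | zero => simp [dpRef_zero]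
  | succ i ih =>
    have h1 := dpRef_succ_le bs i i (le_refl _) (by
      rw [parP_succ bs i (by omega), xor_aba,
        (pvBits_pc (Hb _ (getD_mem' bs i (by omega)))).1])
    have := ih (by omega)
    omega

theorem dpRef_pos (bs : List Nat) (Hb : ∀ b ∈ bs, b ∈ pvBits) (i : Nat)
    (h : i < bs.length) : 1 ≤ dpRef bs (i + 1) := by
  obtain ⟨j, _, _, he⟩ := dpRef_succ_eq bs Hb i h
  omega

theorem dpRef_mono (bs : List Nat) (Hb : ∀ b ∈ bs, b ∈ pvBits) (j i : Nat)
    (hj1 : 1 ≤ j) (hji : j < i) (hi : i ≤ bs.length)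
    (hp : parP bs j = parP bs i) : dpRef bs i ≤ dpRef bs j := by
  obtain ⟨j', rfl⟩ : ∃ j', j = j' + 1 := ⟨j - 1, by omega⟩
  obtain ⟨i', rfl⟩ : ∃ i', i = i' + 1 := ⟨i - 1, by omega⟩
  obtain ⟨k, hk, hc, he⟩ := dpRef_succ_eq bs Hb j' (by omega)
  rw [he]
  exact dpRef_succ_le bs i' k (by omega) (by rw [← hp]; exact hc)

-- ---- the best-seen-value option A's dict realises ----
def mOpt (bs : List Nat) (i p : Nat) : Option Nat :=
  PySem.List.min? (((List.range (i + 1)).filter (fun j => parP bs j == p)).map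
    (dpRef bs)) (fun x => x)

theorem mOpt_mem (bs : List Nat) (i p m : Nat) (h : mOpt bs i p = some m) :
    ∃ k, k ≤ i ∧ parP bs k = p ∧ m = dpRef bs k := by
  have := PySem.List.min?_mem h
  simp only [List.mem_map, List.mem_filter, List.mem_range, beq_iff_eq] at this
  obtain ⟨k, ⟨hk, hp⟩, he⟩ := this
  exact ⟨k, by omega, hp, he.symm⟩

theorem mOpt_min (bs : List Nat) (i p m : Nat) (h : mOpt bs i p = some m)
    (k : Nat) (hk : k ≤ i) (hp : parP bs k = p) : m ≤ dpRef bs k := by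
  have := PySem.List.min?_isMin h (dpRef bs k) (by
    simp only [List.mem_map, List.mem_filter, List.mem_range, beq_iff_eq]
    exact ⟨k, ⟨by omega, hp⟩, rfl⟩)
  simpa using this

theorem mOpt_some (bs : List Nat) (i p k : Nat) (hk : k ≤ i) (hp : parP bs k = p) :
    ∃ m, mOpt bs i p = some m := by
  rcases h : mOpt bs i p with _ | m
  · rw [mOpt, PySem.List.min?_eq_none_iff] at h
    have : dpRef bs k ∈ (((List.range (i + 1)).filter (fun j => parP bs j == p)).map (dpRef bs)) := by
      simp only [List.mem_map, List.mem_filter, List.mem_range, beq_iff_eq]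
      exact ⟨k, ⟨by omega, hp⟩, rfl⟩
    rw [h] at this
    simp at this
  · exact ⟨m, rfl⟩

theorem mOpt_stable (bs : List Nat) (i q : Nat) (hq : parP bs (i + 1) ≠ q) :
    mOpt bs (i + 1) q = mOpt bs i q := by
  unfold mOpt
  congr 1
  rw [List.range_succ, List.filter_append]
  have hb : (parP bs (i + 1) == q) = false := by simpa using hq
  have : (List.filter (fun j => parP bs j == q) [i + 1]) = [] := by
    simp [List.filter, hb]
  rw [this, List.append_nil]

-- ---- the key step: A's dict update value = the new best for the new parity ----
theorem key_step (bs : List Nat) (Hb : ∀ b ∈ bs, b ∈ pvBits) (i : Nat)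
    (hi : i < bs.length) :
    ∃ M, mOpt bs (i + 1) (parP bs (i + 1)) = some M ∧
      min ((PySem.List.min? (pvBits.map (fun bit =>
          (mOpt bs i (parP bs (i + 1) ^^^ bit)).getD bs.length + 1)) (fun x => x)).getD 0)
        ((mOpt bs i (parP bs (i + 1))).getD bs.length) = M := by
  obtain ⟨M, hM⟩ := mOpt_some bs (i + 1) (parP bs (i + 1)) (i + 1) (le_refl _) rfl
  have hMdp : M ≤ dpRef bs (i + 1) := mOpt_min bs (i + 1) _ M hM (i + 1) (le_refl _) rfl
  have hdple : dpRef bs (i + 1) ≤ i + 1 := dpRef_le bs Hb (i + 1) (by omega)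
  refine ⟨M, hM, ?_⟩
  set p' := parP bs (i + 1) with hp'
  set g' := (mOpt bs i p').getD bs.length with hg'
  set L := pvBits.map (fun bit => (mOpt bs i (p' ^^^ bit)).getD bs.length + 1) with hL
  set inner := (PySem.List.min? L (fun x => x)).getD 0 with hinner
  have h1mem : (1 : Nat) ∈ pvBits := (mem_pvBits 1).mpr ⟨0, by omega, rfl⟩
  have hx0 : (mOpt bs i (p' ^^^ 1)).getD bs.length + 1 ∈ L := List.mem_map.mpr ⟨1, h1mem, rfl⟩
  obtain ⟨hinmem, hinmin⟩ := pyminD_spec L _ hx0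
  have hMi : M ≤ inner := by
    obtain ⟨bit0, hbit0, he⟩ := List.mem_map.mp hinmem
    rcases h0 : mOpt bs i (p' ^^^ bit0) with _ | m
    · rw [h0] at he; simp only [Option.getD_none] at he; omega
    · obtain ⟨k, hk, hpk, hmk⟩ := mOpt_mem bs i _ m h0
      have hc : popcount (p' ^^^ parP bs k) ≤ 1 := by
        rw [hpk, xor_aab, (pvBits_pc hbit0).1]
      have hstep := dpRef_succ_le bs i k hk hc
      rw [h0] at he; simp only [Option.getD_some] at he
      omega
  have hMg : M ≤ g' := by
    rcases hg : mOpt bs i p' with _ | m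
    · rw [hg', hg]; simp only [Option.getD_none]; omega
    · obtain ⟨k, hk, hpk, hmk⟩ := mOpt_mem bs i _ m hg
      have := mOpt_min bs (i + 1) p' M hM k (by omega) hpk
      rw [hg', hg]; simp only [Option.getD_some]; omega
  have hminle : inner ≤ M ∨ g' ≤ M := by
    obtain ⟨k0, hk0, hpk0, hMk0⟩ := mOpt_mem bs (i + 1) p' M hM
    rcases Nat.lt_or_ge k0 (i + 1) with hlt | hge
    · right
      obtain ⟨m, hm⟩ := mOpt_some bs i p' k0 (by omega) hpk0
      have hle := mOpt_min bs i p' m hm k0 (by omega) hpk0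
      rw [hg', hm]; simp only [Option.getD_some]; omega
    · have hk0' : k0 = i + 1 := by omega
      subst hk0'
      obtain ⟨k', hk', hc', he'⟩ := dpRef_succ_eq bs Hb i hi
      rw [← hp'] at hc'
      by_cases hz : popcount (p' ^^^ parP bs k') = 0
      · right
        have hxz : p' ^^^ parP bs k' = 0 := (pc_eq_zero _).mp hz
        have hpp : parP bs k' = p' := (Nat.xor_eq_zero_iff.mp hxz).symm
        obtain ⟨m, hm⟩ := mOpt_some bs i p' k' hk' hpp
        have hle := mOpt_min bs i p' m hm k' hk' hpp
        rw [hg', hm]; simp only [Option.getD_some]; omega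
      · left
        have hc1 : popcount (p' ^^^ parP bs k') = 1 := by omega
        have hxmem : (p' ^^^ parP bs k') ∈ pvBits :=
          mem_pvBits_of_pc (Nat.xor_lt_two_pow (parP_lt bs Hb (i + 1)) (parP_lt bs Hb k')) hc1
        have hememL : (mOpt bs i (p' ^^^ (p' ^^^ parP bs k'))).getD bs.length + 1 ∈ L :=
          List.mem_map.mpr ⟨_, hxmem, rfl⟩
        have hinle := hinmin _ hememL
        rw [xor_aab] at hinle
        obtain ⟨m, hm⟩ := mOpt_some bs i (parP bs k') k' hk' rfl
        have hle := mOpt_min bs i _ m hm k' hk' rfl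
        rw [hm] at hinle; simp only [Option.getD_some] at hinle
        omega
  omega

-- ---- A's loop state ----
def stA (n : Nat) (bs : List Nat) (i : Nat) : PySem.Dict Nat Nat × Nat :=
  (bs.take i).foldl (fStep n) ((PySem.Dict.empty : PySem.Dict Nat Nat).insert 0 0, 0)

theorem stA_succ (n : Nat) (bs : List Nat) (i : Nat) (h : i < bs.length) :
    stA n bs (i + 1) = fStep n (stA n bs i) (bs.getD i 0) := by
  unfold stA
  rw [take_succ_eq bs i h, List.foldl_append]
  rfl

theorem stA_inv (bs : List Nat) (Hb : ∀ b ∈ bs, b ∈ pvBits) (i : Nat)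
    (h : i ≤ bs.length) :
    (stA bs.length bs i).2 = parP bs i ∧
    ∀ p, (stA bs.length bs i).1.get? p = mOpt bs i p := by
  induction i with
  | zero =>
    constructor
    · rfl
    · intro p
      show ((PySem.Dict.empty : PySem.Dict Nat Nat).insert 0 0).get? p = mOpt bs 0 p
      rw [PySem.Dict.get?_insert]
      by_cases hp : p = 0
      · subst hp
        rw [if_pos rfl]
        unfold mOpt
        have hf : ((List.range 1).filter (fun j => parP bs j == 0)).map (dpRef bs) = [0] := by
          simp [List.range_one, parP_zero, dpRef_zero]
        rw [hf, PySem.List.min?_id_cons]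
        rfl
      · rw [if_neg hp]
        unfold mOpt
        have hf : ((List.range 1).filter (fun j => parP bs j == p)).map (dpRef bs) = [] := by
          have : (parP bs 0 == p) = false := by
            rw [parP_zero]; simpa using fun he => hp he.symm
          simp [List.range_one, this]
        rw [hf, (PySem.List.min?_eq_none_iff _ _).mpr rfl]
        exact PySem.Dict.get?_empty p
  | succ i ih =>
    obtain ⟨ih2, ih1⟩ := ih (by omega)
    rw [stA_succ bs.length bs i (by omega)]
    have hpat : (stA bs.length bs i).2 ^^^ bs.getD i 0 = parP bs (i + 1) := by
      rw [ih2, parP_succ bs i (by omega)]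
    have hgetD : ∀ q, (stA bs.length bs i).1.getD q bs.length =
        (mOpt bs i q).getD bs.length := by
      intro q; rw [PySem.Dict.getD_eq_get?_getD, ih1 q]
    constructor
    · simp only [fStep]; exact hpat
    · intro p
      simp only [fStep]
      rw [PySem.Dict.get?_insert]
      by_cases hp : p = (stA bs.length bs i).2 ^^^ bs.getD i 0
      · subst hp
        rw [if_pos rfl, hpat]
        obtain ⟨M, hM, hMv⟩ := key_step bs Hb i (by omega)
        rw [hM]
        congr 1
        rw [← hMv]
        simp only [hgetD]
      · rw [if_neg hp, ih1 p]
        have hne : parP bs (i + 1) ≠ p := by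
          rw [← hpat]; exact fun he => hp he.symm
        exact (mOpt_stable bs i p hne).symm

-- ---- bridges from the two ports to parP / dpRef ----
theorem parP_append (bs : List Nat) (b : Nat) (j : Nat) (hj : j ≤ bs.length) :
    parP (bs ++ [b]) j = parP bs j := by
  unfold parP
  rw [List.take_append_of_le_length hj]

theorem parP_append_last (bs : List Nat) (b : Nat) :
    parP (bs ++ [b]) (bs.length + 1) = parP bs bs.length ^^^ b := by
  unfold parP
  have h1 : (bs ++ [b]).take (bs.length + 1) = bs ++ [b] := by
    apply List.take_of_length_le; simp
  have h2 : bs.take bs.length = bs := List.take_length ..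
  rw [h1, h2, List.foldl_append]
  rfl

theorem foldP (bs : List Nat) :
    bs.foldl (fun acc b => acc ++ [PySem.List.pyGetD acc (-1) 0 ^^^ b]) [0] =
    (List.range (bs.length + 1)).map (parP bs) := by
  induction bs using List.reverseRecOn with
  | nil => rfl
  | append_singleton bs b ih =>
    rw [List.foldl_append, ih]
    simp only [List.foldl_cons, List.foldl_nil]
    have hsplit : List.range (bs.length + 1) = List.range bs.length ++ [bs.length] :=
      List.range_succ
    rw [hsplit, List.map_append]
    simp only [List.map_cons, List.map_nil]
    rw [PySem.List.pyGetD_neg_one_append_singleton]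
    have hlen : (bs ++ [b]).length = bs.length + 1 := by simp
    rw [hlen]
    rw [List.range_succ, List.map_append, List.range_succ, List.map_append]
    simp only [List.map_cons, List.map_nil]
    rw [parP_append_last bs b, parP_append bs b bs.length (le_refl _)]
    congr 2
    apply List.map_congr_left
    intro j hj
    rw [List.mem_range] at hj
    rw [parP_append bs b j (by omega)]

theorem foldDP (bs : List Nat) (P : List Nat)
    (hP : ∀ j, j ≤ bs.length → P.getD j 0 = parP bs j) (i : Nat) (hi : i ≤ bs.length) :
    (List.range' 1 i).foldl (fun dp i =>
        dp ++ [(PySem.List.min? ((List.range i).filterMap (fun j =>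
            if popcount (P.getD i 0 ^^^ P.getD j 0) ≤ 1 then some (dp.getD j 0 + 1)
            else none)) (fun x => x)).getD 0]) [0] =
    (List.range (i + 1)).map (dpRef bs) := by
  induction i with
  | zero => simp [List.range_one, dpRef_zero]
  | succ i ih =>
    rw [List.range'_concat, List.foldl_append, ih (by omega)]
    simp only [List.foldl_cons, List.foldl_nil, Nat.one_mul]
    have hidx : 1 + i = i + 1 := by omega
    rw [hidx]
    rw [List.range_succ (n := i + 1), List.map_append]
    simp only [List.map_cons, List.map_nil]
    congr 2
    rw [dpRef_succ]
    congr 2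
    unfold cands
    apply List.filterMap_congr
    intro j hj
    rw [List.mem_range] at hj
    rw [hP (i + 1) (by omega), hP j (by omega),
      PySem.List.getD_map_range (dpRef bs) (i + 1) j 0 (by omega)]

-- ---- the two results agree on any bit list ----
theorem main_eq (bs : List Nat) (Hb : ∀ b ∈ bs, b ∈ pvBits) :
    (if (stA bs.length bs bs.length).2 = 0 then 1
     else ((stA bs.length bs bs.length).1.get? (stA bs.length bs bs.length).2).getD 0) =
    (if bs.length = 0 then 1 else dpRef bs bs.length) := by
  obtain ⟨h2, h1⟩ := stA_inv bs Hb bs.length (le_refl _)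
  rw [h2]
  by_cases hn : bs.length = 0
  · have hz : parP bs bs.length = 0 := by rw [hn, parP_zero]
    rw [if_pos hz, if_pos hn]
  · rw [if_neg hn]
    obtain ⟨m', hm'⟩ : ∃ m', bs.length = m' + 1 := ⟨bs.length - 1, by omega⟩
    by_cases hp0 : parP bs bs.length = 0
    · rw [if_pos hp0]
      have hge := dpRef_pos bs Hb m' (by omega)
      have hle := dpRef_succ_le bs m' 0 (by omega) (by
        rw [← hm', hp0, parP_zero]
        simp [pc_zero])
      rw [dpRef_zero] at hle
      rw [hm'] at *
      omega
    · rw [if_neg hp0, h1]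
      obtain ⟨m, hm⟩ := mOpt_some bs bs.length (parP bs bs.length) bs.length (le_refl _) rfl
      rw [hm]
      simp only [Option.getD_some]
      obtain ⟨k0, hk0, hpk0, hmk0⟩ := mOpt_mem bs bs.length _ m hm
      have hmle : m ≤ dpRef bs bs.length :=
        mOpt_min bs bs.length _ m hm bs.length (le_refl _) rfl
      rcases Nat.lt_or_ge k0 bs.length with hlt | hge
      · have hk0pos : 1 ≤ k0 := by
          rcases Nat.eq_zero_or_pos k0 with rfl | h
          · rw [parP_zero] at hpk0; exact absurd hpk0.symm hp0
          · omega
        have := dpRef_mono bs Hb k0 bs.length hk0pos hlt (le_refl _) hpk0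
        omega
      · have : k0 = bs.length := by omega
        subst this
        omega

-- ---- characters to bits ----
theorem mapM_bits (cs : List Char) (hpre : ∀ c ∈ cs, 71 ≤ c.toNat ∧ c.toNat ≤ 122) :
    ∃ bs, cs.mapM (fun c => PySem.List.pyGet? pvBits ((c.toNat : Int) - 97)) = some bs ∧
      bs.length = cs.length ∧ ∀ b ∈ bs, b ∈ pvBits := by
  induction cs with
  | nil => exact ⟨[], rfl, rfl, by simp⟩
  | cons c t ih =>
    obtain ⟨bs, hbs, hlen, hmem⟩ := ih (fun x hx => hpre x (by simp [hx]))
    have hc := hpre c (by simp)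
    have hlen26 : pvBits.length = 26 := by simp [pvBits]
    rcases hb : PySem.List.pyGet? pvBits ((c.toNat : Int) - 97) with _ | b
    · rw [PySem.List.pyGet?_eq_none_iff, hlen26] at hb
      exfalso; apply hb; unfold PySem.Raise.InRange; omega
    · refine ⟨b :: bs, ?_, by simp [hlen], ?_⟩
      · rw [List.mapM_cons, hb, hbs]; rfl
      · intro x hx
        rcases List.mem_cons.mp hx with rfl | hx
        · exact PySem.List.mem_of_pyGet?_eq_some _ hb
        · exact hmem x hx

theorem f_eq (str : String) (bs : List Nat)
    (hbs : str.toList.mapM (fun c => PySem.List.pyGet? pvBits ((c.toNat : Int) - 97)) = some bs)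
    (hlen : bs.length = str.toList.length) :
    f str = (if (stA bs.length bs bs.length).2 = 0 then (1 : Int)
      else ((((stA bs.length bs bs.length).1.get?
        (stA bs.length bs bs.length).2).getD 0 : Nat) : Int)) := by
  unfold f
  rw [hbs]
  dsimp only
  rw [← hlen]
  unfold stA
  rw [List.take_length]

theorem falt_eq (str : String) (bs : List Nat)
    (hbs : str.toList.mapM (fun c => PySem.List.pyGet? pvBits ((c.toNat : Int) - 97)) = some bs) :
    f_alt str = (if bs.length = 0 then (1 : Int) else ((dpRef bs bs.length : Nat) : Int)) := by
  unfold f_alt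
  rw [hbs]
  dsimp only
  have hP : ∀ j, j ≤ bs.length →
      ((List.range (bs.length + 1)).map (parP bs)).getD j 0 = parP bs j := by
    intro j hj
    exact PySem.List.getD_map_range (parP bs) (bs.length + 1) j 0 (by omega)
  rw [foldP bs, foldDP bs _ hP bs.length (le_refl _),
    PySem.List.getD_map_range (dpRef bs) (bs.length + 1) bs.length 0 (by omega)]

-- ===== VERDICT (by name: the statement is the Claim_ definition above) =====
theorem f_spec : Claim_equal_f := by
  intro str _ hpre
  unfold Spec_f
  have hpre' : ∀ c ∈ str.toList, 71 ≤ c.toNat ∧ c.toNat ≤ 122 := by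
    intro c hc
    have := (List.all_eq_true.mp hpre) c hc
    simp only [Bool.and_eq_true, decide_eq_true_eq] at this
    exact this
  obtain ⟨bs, hbs, hlen, hmem⟩ := mapM_bits str.toList hpre'
  rw [f_eq str bs hbs hlen, falt_eq str bs hbs]
  have key := main_eq bs hmem
  split_ifs at key ⊢ <;> exact_mod_cast key
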